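-- pv_equiv track=rewrite | github.com/HeyJunie/GroupStudy | 05_30/01.py | solution
-- ===== SOURCE A (Python) =====
-- def solution(nums, m):
--     answer = []
--     n = len(nums)
--     for i in range(m):
--         for j in range(n - i - 1):
--             nums[j] = nums[j + 1] - nums[j]
--     answer = nums[:n - m]
--
--     return answer
-- ===== SOURCE B (Python) =====
-- def solution(nums, m):
--     n = len(nums)
--     if m <= 0:
--         return nums[:]
--     if n <= m:
--         return []
--     # signed binomial kernel: m-th difference at j = sum_k w[k] * nums[j+k]
--     w = [1]
--     for _ in range(m):
--         w = [a - b for a, b in zip([0] + w, w + [0])]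
--     return [sum(w[k] * nums[j + k] for k in range(m + 1)) for j in range(n - m)]
-- ===== Notes on version B (the rewrite author's own statement) =====
-- stated objective: alternative
-- what changed: B replaces A's m destructive in-place difference passes over the array by a single convolution of nums with the order-m signed binomial-coefficient kernel (built once by Pascal-style updates); B also does not mutate its argument, the equivalence is about the return value.
-- intended difference: On inputs with 0 < len(nums) < m < 2*len(nums), A returns a prefix of its half-updated buffer containing stale differences of mixed orders (leftover loop state behind a negative slice bound), while B returns [] — the m-th finite difference of fewer than m+1 values does not exist, so the empty list is the intended value. — e.g. on solution([1, 2], 3): A returns [1], B returns []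
import Mathlib
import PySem

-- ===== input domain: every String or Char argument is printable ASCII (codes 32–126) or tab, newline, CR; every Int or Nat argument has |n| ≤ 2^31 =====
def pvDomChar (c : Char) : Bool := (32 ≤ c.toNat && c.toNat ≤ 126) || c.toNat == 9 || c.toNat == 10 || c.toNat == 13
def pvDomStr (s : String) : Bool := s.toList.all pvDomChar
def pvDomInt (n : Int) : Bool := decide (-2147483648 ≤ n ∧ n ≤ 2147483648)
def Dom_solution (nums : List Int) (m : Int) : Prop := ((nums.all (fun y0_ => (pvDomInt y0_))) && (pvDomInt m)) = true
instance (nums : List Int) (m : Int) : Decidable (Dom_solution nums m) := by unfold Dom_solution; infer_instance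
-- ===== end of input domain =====

-- B replaces A's m in-place difference passes by a one-shot convolution of nums with the
-- signed binomial kernel (alternative algorithm, same O(m·n) cost; return value only —
-- A mutates its argument list in place, B does not).

-- ===== PORT A =====
def solution (nums : List Int) (m : Int) : List Int :=
  let n : Int := PySem.List.len nums
  let nums := (PySem.List.pyRange 0 m 1).foldl (fun a i =>
    (PySem.List.pyRange 0 (n - i - 1) 1).foldl (fun a j =>
      PySem.List.pySetD a j (PySem.List.pyGetD a (j + 1) 0 - PySem.List.pyGetD a j 0)) a) nums
  PySem.List.slice nums none (some (n - m))

-- ===== PORT B =====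
-- indices j+k and k are always in range in this branch, so pyGetD is exact for nums[j+k] / w[k]
def solution_alt (nums : List Int) (m : Int) : List Int :=
  let n : Int := PySem.List.len nums
  if m ≤ 0 then nums
  else if n ≤ m then []
  else
    let w := (PySem.List.pyRange 0 m 1).foldl (fun w _ =>
      List.zipWith (fun a b => a - b) (0 :: w) (w ++ [0])) [1]
    (PySem.List.pyRange 0 (n - m) 1).map (fun j =>
      ((PySem.List.pyRange 0 (m + 1) 1).map (fun k =>
        PySem.List.pyGetD w k 0 * PySem.List.pyGetD nums (j + k) 0)).sum)

-- ===== PRECONDITION & SPEC =====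
-- On 0 < len(nums) < m < 2*len(nums), A returns a prefix of its mutated buffer whose entries are
-- stale differences of mixed orders (leftover loop state), while B returns [] — the m-th finite
-- difference of fewer than m+1 values does not exist, so the empty answer is the intended one.
def D_solution (nums : List Int) (m : Int) : Prop :=
  0 < (nums.length : Int) ∧ (nums.length : Int) < m ∧ m < 2 * (nums.length : Int)
instance (nums : List Int) (m : Int) : Decidable (D_solution nums m) := by unfold D_solution; infer_instance

def Spec_solution (nums : List Int) (m : Int) (out : List Int) : Prop := ¬ D_solution nums m → out = solution_alt nums m
instance (nums : List Int) (m : Int) (out : List Int) : Decidable (Spec_solution nums m out) := by unfold Spec_solution; infer_instance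

def pvDiffWitness_solution : List Int × Int := ([1, 2], 3)
def pvDiffWitnessOut_solution : (List Int) × (List Int) := ([1], [])

-- ===== CLAIM (what is proved, stated in full; the proofs are below) =====
def Claim_unchanged_solution : Prop := ∀ (nums : List Int) (m : Int), Dom_solution nums m → Spec_solution nums m (solution nums m)
def Claim_changed_solution : Prop := Dom_solution (pvDiffWitness_solution.1) (pvDiffWitness_solution.2) ∧ D_solution (pvDiffWitness_solution.1) (pvDiffWitness_solution.2) ∧ solution (pvDiffWitness_solution.1) (pvDiffWitness_solution.2) = pvDiffWitnessOut_solution.1 ∧ solution_alt (pvDiffWitness_solution.1) (pvDiffWitness_solution.2) = pvDiffWitnessOut_solution.2 ∧ pvDiffWitnessOut_solution.1 ≠ pvDiffWitnessOut_solution.2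
def Claim_exact_solution : Prop := ∀ (nums : List Int) (m : Int), Dom_solution nums m → D_solution nums m → solution nums m ≠ solution_alt nums m

-- ===== LEMMAS AND PROOFS =====

-- one difference pass, as a pure function
def dstep (l : List Int) : List Int := List.zipWith (fun a b => b - a) l l.tail

-- m difference passes
def diter : Nat → List Int → List Int
  | 0, l => l
  | k + 1, l => dstep (diter k l)

-- the signed binomial kernel of order k
def wseq : Nat → List Int
  | 0 => [1]
  | k + 1 => List.zipWith (fun a b => a - b) (0 :: wseq k) (wseq k ++ [0])

-- dot product (truncating)
def dot (w y : List Int) : Int := (List.zipWith (· * ·) w y).sum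

-- A's in-place inner-loop body and inner loop, over Nat indices
def updA (s : List Int) (j : Nat) : List Int := s.set j (s.getD (j + 1) 0 - s.getD j 0)
def passA (s : List Int) (l : List Nat) : List Int := l.foldl updA s

theorem length_dstep (l : List Int) : (dstep l).length = l.length - 1 := by
  simp [dstep]

theorem length_diter (k : Nat) (l : List Int) : (diter k l).length = l.length - k := by
  induction k with
  | zero => simp [diter]
  | succ k ih => simp [diter, length_dstep, ih]; omega

theorem length_wseq (k : Nat) : (wseq k).length = k + 1 := by
  induction k with
  | zero => simp [wseq]
  | succ k ih => simp [wseq, ih]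

theorem dot_append_zero (w y : List Int) : dot (w ++ [0]) y = dot w y := by
  induction w generalizing y with
  | nil => cases y <;> simp [dot]
  | cons a w ih =>
    cases y with
    | nil => simp [dot]
    | cons c y =>
      have hx := ih y
      simp only [dot, List.cons_append, List.zipWith_cons_cons, List.sum_cons] at hx ⊢
      rw [hx]

theorem dot_sub (a b y : List Int) (h : a.length = b.length) :
    dot (List.zipWith (fun x z => x - z) a b) y = dot a y - dot b y := by
  induction a generalizing b y with
  | nil =>
    cases b with
    | nil => simp [dot]
    | cons _ _ => simp at h
  | cons x a ih =>
    cases b with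
    | nil => simp at h
    | cons z b =>
      have h' : a.length = b.length := by simpa using h
      cases y with
      | nil => simp [dot]
      | cons c y =>
        have hx := ih b y h'
        simp only [dot, List.zipWith_cons_cons, List.sum_cons] at hx ⊢
        rw [hx]; ring

theorem dot_wsucc (k : Nat) (c : Int) (y : List Int) :
    dot (wseq (k + 1)) (c :: y) = dot (wseq k) y - dot (wseq k) (c :: y) := by
  show dot (List.zipWith (fun a b => a - b) (0 :: wseq k) (wseq k ++ [0])) (c :: y) = _
  rw [dot_sub _ _ _ (by simp [length_wseq]), dot_append_zero]
  simp [dot]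

theorem dot_one (c : Int) (y : List Int) : dot [1] (c :: y) = c := by simp [dot]

theorem dstep_map_range (f : Nat → Int) (N : Nat) :
    dstep ((List.range N).map f) = (List.range (N - 1)).map (fun j => f (j + 1) - f j) := by
  apply List.ext_getElem
  · simp [length_dstep]
  · intro j h1 h2
    simp only [length_dstep, List.length_map, List.length_range] at h1
    have hj1 : j + 1 < N := by omega
    simp [dstep, List.getElem_zipWith, List.getElem_tail]

theorem diter_eq (k : Nat) (L : List Int) :
    diter k L = (List.range (L.length - k)).map (fun j => dot (wseq k) (L.drop j)) := by
  induction k with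
  | zero =>
    apply List.ext_getElem
    · simp [diter]
    · intro j h1 h2
      have hj : j < L.length := by simpa [diter] using h1
      have hd := List.drop_eq_getElem_cons hj
      show L[j] = _
      simp only [List.getElem_map, List.getElem_range]
      rw [show wseq 0 = [1] from rfl, hd, dot_one]
  | succ k ih =>
    show dstep (diter k L) = _
    rw [ih, dstep_map_range]
    have hN : L.length - k - 1 = L.length - (k + 1) := by omega
    rw [hN]
    apply List.map_congr_left
    intro j hj
    have hj' : j < L.length - (k + 1) := List.mem_range.mp hj
    have hd : L.drop j = L[j]'(by omega) :: L.drop (j + 1) := List.drop_eq_getElem_cons (by omega)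
    rw [hd, dot_wsucc]

theorem passA_cons (x : Int) (s : List Int) (l : List Nat) :
    passA (x :: s) (l.map Nat.succ) = x :: passA s l := by
  induction l generalizing x s with
  | nil => simp [passA]
  | cons j l ih =>
    show passA (updA (x :: s) (j + 1)) (l.map Nat.succ) = x :: passA (updA s j) l
    have hupd : updA (x :: s) (j + 1) = x :: updA s j := by
      simp [updA]
    rw [hupd, ih]

theorem passA_spec (d junk : List Int) (h : d ≠ []) :
    passA (d ++ junk) (List.range (d.length - 1)) = dstep d ++ d.getLast h :: junk := by
  induction d generalizing junk with
  | nil => exact absurd rfl h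
  | cons x d ih =>
    cases d with
    | nil => simp [passA, dstep]
    | cons y t =>
      have hlen : (x :: y :: t).length - 1 = ((y :: t).length - 1) + 1 := by simp
      rw [hlen, List.range_succ_eq_map]
      show passA (updA ((x :: y :: t) ++ junk) 0) (((List.range ((y :: t).length - 1))).map Nat.succ) = _
      have hupd : updA ((x :: y :: t) ++ junk) 0 = (y - x) :: ((y :: t) ++ junk) := by
        simp [updA]
      rw [hupd, passA_cons, ih junk (by simp)]
      have hlast : (x :: y :: t).getLast h = (y :: t).getLast (by simp) := by
        simp [List.getLast_cons]
      rw [hlast]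
      simp [dstep]

theorem length_passA (s : List Int) (l : List Nat) : (passA s l).length = s.length := by
  induction l generalizing s with
  | nil => simp [passA]
  | cons j l ih =>
    show (passA (updA s j) l).length = s.length
    rw [ih]; simp [updA]

-- bridge: A's Int-indexed inner loop is passA over Nat indices
theorem inner_eq (a : List Int) (K : Int) :
    (PySem.List.pyRange 0 K 1).foldl (fun a j =>
        PySem.List.pySetD a j (PySem.List.pyGetD a (j + 1) 0 - PySem.List.pyGetD a j 0)) a
      = passA a (List.range K.toNat) := by
  rw [PySem.List.pyRange_one, List.foldl_map]
  have hfun : (fun (a : List Int) (k : Nat) =>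
      PySem.List.pySetD a (0 + (k:Int)) (PySem.List.pyGetD a (0 + (k:Int) + 1) 0 -
        PySem.List.pyGetD a (0 + (k:Int)) 0)) = updA := by
    funext a k
    have h1 : (0:Int) + (k:Int) = ((k:Nat):Int) := by omega
    have h2 : (0:Int) + (k:Int) + 1 = (((k + 1 : Nat)):Int) := by push_cast; ring
    rw [h2, h1, PySem.List.pySetD_natCast, PySem.List.pyGetD_natCast, PySem.List.pyGetD_natCast]
    rfl
  simp only [Int.sub_zero]
  rw [hfun]
  rfl

-- bridge: A's outer loop is a fold of passA over Nat pass indices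
theorem outer_eq (L : List Int) (m : Int) :
    (PySem.List.pyRange 0 m 1).foldl (fun a i =>
      (PySem.List.pyRange 0 ((PySem.List.len L) - i - 1) 1).foldl (fun a j =>
        PySem.List.pySetD a j (PySem.List.pyGetD a (j + 1) 0 - PySem.List.pyGetD a j 0)) a) L
      = (List.range m.toNat).foldl (fun a i => passA a (List.range (L.length - i - 1))) L := by
  rw [PySem.List.pyRange_one, List.foldl_map, Int.sub_zero]
  apply List.foldl_ext
  intro a k _
  rw [inner_eq]
  congr 1
  have : ((PySem.List.len L) - (0 + (k:Int)) - 1).toNat = L.length - k - 1 := by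
    simp only [PySem.List.len_eq]; omega
  rw [this]

-- invariant: after t passes the buffer is the t-th differences followed by stale entries
theorem passes_inv (L : List Int) (t : Nat) (ht : t ≤ L.length) :
    ∃ junk : List Int,
      (List.range t).foldl (fun a i => passA a (List.range (L.length - i - 1))) L
        = diter t L ++ junk := by
  induction t with
  | zero => exact ⟨[], by simp [diter]⟩
  | succ t ih =>
    obtain ⟨junk, hj⟩ := ih (by omega)
    rw [List.range_succ, List.foldl_append]
    rw [hj]
    have hd : (diter t L).length = L.length - t := length_diter t L
    have hne : diter t L ≠ [] := by
      apply List.ne_nil_of_length_pos; omega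
    have hcnt : L.length - t - 1 = (diter t L).length - 1 := by omega
    simp only [List.foldl_cons, List.foldl_nil]
    rw [hcnt, passA_spec (diter t L) junk hne]
    exact ⟨(diter t L).getLast hne :: junk, rfl⟩

theorem length_foldl_passA (L : List Int) (l : List Nat) (g : Nat → List Nat) :
    (l.foldl (fun a i => passA a (g i)) L).length = L.length := by
  induction l generalizing L with
  | nil => rfl
  | cons j l ih =>
    show (l.foldl _ (passA L (g j))).length = L.length
    rw [ih, length_passA]

theorem wfold_nat (K : Nat) :
    (List.range K).foldl (fun w (_ : Nat) =>
      List.zipWith (fun a b => a - b) (0 :: w) (w ++ [0])) [1] = wseq K := by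
  induction K with
  | zero => rfl
  | succ K ih => rw [List.range_succ, List.foldl_append, ih]; rfl

theorem wfold (m : Int) :
    (PySem.List.pyRange 0 m 1).foldl (fun w _ =>
      List.zipWith (fun a b => a - b) (0 :: w) (w ++ [0])) [1] = wseq m.toNat := by
  rw [PySem.List.pyRange_one, List.foldl_map, Int.sub_zero]
  exact wfold_nat m.toNat

theorem dot_eq_sum (w y : List Int) :
    dot w y = ((List.range w.length).map (fun k => w.getD k 0 * y.getD k 0)).sum := by
  induction w generalizing y with
  | nil => simp [dot]
  | cons a w ih =>
    cases y with
    | nil =>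
      simp [dot, List.getD]
    | cons c y =>
      simp only [List.length_cons, List.range_succ_eq_map, List.map_cons, List.map_map,
        List.sum_cons, List.getD_cons_zero]
      have : (fun k => (a :: w).getD k 0 * (c :: y).getD k 0) ∘ Nat.succ
           = fun k => w.getD k 0 * y.getD k 0 := by
        funext k; simp
      rw [this, ← ih]
      simp [dot]

theorem drop_getD (l : List Int) (j t : Nat) (d : Int) :
    (l.drop j).getD t d = l.getD (j + t) d := by
  simp [List.getD_eq_getElem?_getD, List.getElem?_drop]

-- the state of A's buffer after all m passes (the main-case computation)
theorem solution_eq_diter (nums : List Int) (m : Int) (h0 : 0 < m) (h1 : m < (nums.length : Int)) :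
    solution nums m = diter m.toNat nums := by
  show PySem.List.slice _ none (some ((PySem.List.len nums) - m)) = _
  rw [outer_eq]
  have hm : m.toNat ≤ nums.length := by omega
  obtain ⟨junk, hj⟩ := passes_inv nums m.toNat hm
  rw [hj]
  rw [PySem.List.len_eq]
  rw [PySem.List.slice_to _ (by omega)]
  have hlen : (diter m.toNat nums).length = ((nums.length : Int) - m).toNat := by
    rw [length_diter]; omega
  exact List.take_left' hlen

-- B's branch value in the main case
theorem alt_eq_map (nums : List Int) (m : Int) (h0 : 0 < m) (h1 : m < (nums.length : Int)) :
    solution_alt nums m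
      = (List.range (nums.length - m.toNat)).map (fun j => dot (wseq m.toNat) (nums.drop j)) := by
  have hif : solution_alt nums m = (PySem.List.pyRange 0 ((PySem.List.len nums) - m) 1).map (fun j =>
      ((PySem.List.pyRange 0 (m + 1) 1).map (fun k =>
        PySem.List.pyGetD (wseq m.toNat) k 0 * PySem.List.pyGetD nums (j + k) 0)).sum) := by
    show (if m ≤ 0 then nums else if (PySem.List.len nums) ≤ m then [] else _) = _
    rw [if_neg (by omega), if_neg (by rw [PySem.List.len_eq]; omega)]
    simp only [wfold]
  rw [hif]
  simp only [PySem.List.pyRange_one, Int.sub_zero, List.map_map, PySem.List.len_eq]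
  rw [show ((nums.length : Int) - m).toNat = nums.length - m.toNat by omega]
  apply List.map_congr_left
  intro j hj
  have hj' : j < nums.length - m.toNat := List.mem_range.mp hj
  simp only [Function.comp_apply]
  rw [show (m + 1).toNat = m.toNat + 1 by omega]
  rw [dot_eq_sum, length_wseq]
  congr 1
  apply List.map_congr_left
  intro t ht
  have ht' : t < m.toNat + 1 := List.mem_range.mp ht
  simp only [Function.comp_apply]
  have e1 : (0:Int) + (t:Int) = ((t:Nat):Int) := by omega
  rw [e1]
  have e2 : ((0:Int) + (j:Int)) + ((t:Nat):Int) = (((j + t : Nat)):Int) := by push_cast; ring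
  rw [e2, PySem.List.pyGetD_natCast, PySem.List.pyGetD_natCast, drop_getD]

-- ===== VERDICT (by name: the statement is the Claim_ definition above) =====
theorem solution_spec : Claim_unchanged_solution := by
  intro nums m _ hnD
  by_cases hm0 : m ≤ 0
  · -- no passes; A's slice keeps the whole list, B returns the list
    show PySem.List.slice _ none (some ((PySem.List.len nums) - m)) = _
    rw [show PySem.List.pyRange 0 m 1 = [] from PySem.List.pyRange_one_eq_nil (by omega)]
    simp only [List.foldl_nil, PySem.List.len_eq]
    rw [PySem.List.slice_to _ (by omega)]
    rw [List.take_of_length_le (by omega)]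
    show _ = (if m ≤ 0 then nums else _)
    rw [if_pos hm0]
  · by_cases hmn : m < (nums.length : Int)
    · -- main case 0 < m < n
      rw [solution_eq_diter nums m (by omega) hmn, alt_eq_map nums m (by omega) hmn,
        diter_eq]
    · -- n ≤ m, outside D_: either m = n, or m ≥ 2n (covers n = 0)
      have hnd : ¬ (0 < (nums.length : Int) ∧ (nums.length : Int) < m ∧ m < 2 * (nums.length : Int)) := hnD
      have halt : solution_alt nums m = [] := by
        show (if m ≤ 0 then nums else if (PySem.List.len nums) ≤ m then [] else _) = []
        rw [if_neg hm0, if_pos (by rw [PySem.List.len_eq]; omega)]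
      rw [halt]
      show PySem.List.slice _ none (some ((PySem.List.len nums) - m)) = []
      rw [outer_eq]
      set st := (List.range m.toNat).foldl (fun a i => passA a (List.range (nums.length - i - 1))) nums with hst
      have hlen : st.length = nums.length := length_foldl_passA nums _ _
      by_cases hme : m = (nums.length : Int)
      · rw [PySem.List.len_eq, PySem.List.slice_to _ (by omega)]
        have : ((nums.length : Int) - m).toNat = 0 := by omega
        rw [this, List.take_zero]
      · -- then 2n ≤ m, so the negative stop clamps to the empty prefix
        have h2n : 2 * (nums.length : Int) ≤ m := by omega
        have hk : 0 < (m - (nums.length : Int)).toNat := by omega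
        have he : (PySem.List.len nums) - m = -(((m - (nums.length : Int)).toNat : Nat) : Int) := by
          rw [PySem.List.len_eq]; omega
        rw [he, PySem.List.slice_to_neg_natCast _ _ hk]
        have : st.length - (m - (nums.length : Int)).toNat = 0 := by omega
        rw [this, List.take_zero]

theorem solution_changed : Claim_changed_solution := by unfold Claim_changed_solution; decide

theorem solution_tight : Claim_exact_solution := by
  intro nums m _ hD heq
  obtain ⟨h1, h2, h3⟩ := hD
  have halt : solution_alt nums m = [] := by
    show (if m ≤ 0 then nums else if (PySem.List.len nums) ≤ m then [] else _) = []
    rw [if_neg (by omega), if_pos (by rw [PySem.List.len_eq]; omega)]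
  have hA : (solution nums m).length = nums.length - (m - (nums.length : Int)).toNat := by
    show (PySem.List.slice _ none (some ((PySem.List.len nums) - m))).length = _
    rw [outer_eq]
    have hlen := length_foldl_passA nums (List.range m.toNat)
      (fun i => List.range (nums.length - i - 1))
    have hk : 0 < (m - (nums.length : Int)).toNat := by omega
    have he : (PySem.List.len nums) - m = -(((m - (nums.length : Int)).toNat : Nat) : Int) := by
      rw [PySem.List.len_eq]; omega
    rw [he, PySem.List.slice_to_neg_natCast _ _ hk, List.length_take, hlen]
    omega
  rw [heq, halt] at hA
  simp at hA
  omega
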